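-- pv_equiv track=rewrite | github.com/Chesterguan/veritasbench | examples/cliniclaw_simulated.py | _extract_drug_tokens
-- ===== SOURCE A (Python) =====
-- DRUG_CLASS_ALIASES = {
--     "fluoxetine": "ssri", "sertraline": "ssri", "paroxetine": "ssri", "citalopram": "ssri",
--     "phenelzine": "maoi", "tranylcypromine": "maoi", "isocarboxazid": "maoi",
--     "ibuprofen": "nsaid", "naproxen": "nsaid", "diclofenac": "nsaid", "indomethacin": "nsaid",
--     "lisinopril": "ace", "enalapril": "ace", "ramipril": "ace", "captopril": "ace",
--     "inhibitor": "ace",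
--     # Fluoroquinolone alias (theophylline interaction)
--     "ciprofloxacin": "ciprofloxacin",
--     # TMP-SMX components — both map to trimethoprim for interaction lookup
--     "sulfamethoxazole": "trimethoprim",
--     # Beta-blocker class
--     "atenolol": "beta", "carvedilol": "beta", "propranolol": "beta",
--     # Nitrate class
--     "isosorbide": "nitrate",
--     # SSRI class — for linezolid+SSRI and SSRI+SSRI interactions
--     "escitalopram": "ssri", "venlafaxine": "ssri", "duloxetine": "ssri",
--     # Ergot alkaloid class
--     "ergotamine": "ergotamine",
--     # TMP-SMX components — sulfamethoxazole also maps to trimethoprim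
--     "sulfamethoxazole": "trimethoprim",
-- }
--
-- def _extract_drug_tokens(resource_str: str) -> set:
--     """Extract all alpha tokens from a resource string (e.g. MedicationRequest/morphine_4mg_standing)."""
--     parts = set()
--     for part in resource_str.replace("/", "_").replace("-", "_").split("_"):
--         if part and part.isalpha() and len(part) > 2:
--             p = part.lower()
--             parts.add(p)
--             if p in DRUG_CLASS_ALIASES:
--                 parts.add(DRUG_CLASS_ALIASES[p])
--     return parts
-- ===== SOURCE B (Python) =====
-- DRUG_CLASS_ALIASES = {
--     "fluoxetine": "ssri", "sertraline": "ssri", "paroxetine": "ssri", "citalopram": "ssri",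
--     "phenelzine": "maoi", "tranylcypromine": "maoi", "isocarboxazid": "maoi",
--     "ibuprofen": "nsaid", "naproxen": "nsaid", "diclofenac": "nsaid", "indomethacin": "nsaid",
--     "lisinopril": "ace", "enalapril": "ace", "ramipril": "ace", "captopril": "ace",
--     "inhibitor": "ace",
--     "ciprofloxacin": "ciprofloxacin",
--     "sulfamethoxazole": "trimethoprim",
--     "atenolol": "beta", "carvedilol": "beta", "propranolol": "beta",
--     "isosorbide": "nitrate",
--     "escitalopram": "ssri", "venlafaxine": "ssri", "duloxetine": "ssri",
--     "ergotamine": "ergotamine",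
-- }
--
--
-- def _extract_drug_tokens(resource_str: str) -> set:
--     """Extract all alpha tokens from a resource string (e.g. MedicationRequest/morphine_4mg_standing).
--
--     Single character-level scan: no replace()/split() pipeline.  A run of
--     non-separator characters is accumulated together with a flag saying
--     whether it is still all-alphabetic; each separator (or the final
--     sentinel) flushes the run if it qualifies.
--     """
--     parts = set()
--     run = []
--     ok = True
--     for ch in resource_str + "_":          # trailing sentinel flushes the last run
--         if ch in "/-_":
--             if ok and len(run) > 2:
--                 p = "".join(run).lower()
--                 parts.add(p)
--                 a = DRUG_CLASS_ALIASES.get(p)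
--                 if a is not None:
--                     parts.add(a)
--             run = []
--             ok = True
--         else:
--             run.append(ch)
--             ok = ok and ch.isalpha()
--     return parts
-- ===== Notes on version B (the rewrite author's own statement) =====
-- stated objective: alternative
-- what changed: A normalizes separators with two replace() calls, splits the string into parts and filters/maps the parts; B never builds the intermediate string or the parts list: it is a single character-level state machine that accumulates a run and an all-alpha flag and flushes the run (token plus alias) at each separator or at the final sentinel.
import Mathlib
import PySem

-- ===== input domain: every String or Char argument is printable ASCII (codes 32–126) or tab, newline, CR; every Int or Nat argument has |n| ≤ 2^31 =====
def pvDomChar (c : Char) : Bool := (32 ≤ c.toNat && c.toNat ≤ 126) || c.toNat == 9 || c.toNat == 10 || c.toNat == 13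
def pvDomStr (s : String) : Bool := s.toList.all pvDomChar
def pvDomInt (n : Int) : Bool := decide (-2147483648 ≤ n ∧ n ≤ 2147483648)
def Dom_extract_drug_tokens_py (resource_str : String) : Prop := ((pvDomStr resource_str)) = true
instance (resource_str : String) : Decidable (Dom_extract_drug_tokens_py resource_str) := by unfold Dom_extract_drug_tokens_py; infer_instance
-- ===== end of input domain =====

-- B change: A's replace/replace/split pipeline over whole strings is replaced by a single
-- character-level state machine that accumulates a run with an all-alpha flag and flushes
-- the run (token plus alias) at each separator or at a final sentinel (alternative
-- decomposition, same cost). The Python return value is a set; the lists here hold its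
-- distinct elements in insertion order.

-- module-level constant shared by both Pythons
def DRUG_CLASS_ALIASES : PySem.Dict String String := PySem.Dict.ofList [
  ("fluoxetine", "ssri"), ("sertraline", "ssri"), ("paroxetine", "ssri"), ("citalopram", "ssri"),
  ("phenelzine", "maoi"), ("tranylcypromine", "maoi"), ("isocarboxazid", "maoi"),
  ("ibuprofen", "nsaid"), ("naproxen", "nsaid"), ("diclofenac", "nsaid"), ("indomethacin", "nsaid"),
  ("lisinopril", "ace"), ("enalapril", "ace"), ("ramipril", "ace"), ("captopril", "ace"),
  ("inhibitor", "ace"),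
  ("ciprofloxacin", "ciprofloxacin"),
  ("sulfamethoxazole", "trimethoprim"),
  ("atenolol", "beta"), ("carvedilol", "beta"), ("propranolol", "beta"),
  ("isosorbide", "nitrate"),
  ("escitalopram", "ssri"), ("venlafaxine", "ssri"), ("duloxetine", "ssri"),
  ("ergotamine", "ergotamine"),
  ("sulfamethoxazole", "trimethoprim")]

-- ===== PORT A =====
def extract_drug_tokens_py (resource_str : String) : List String :=
  (((PySem.Str.split? (PySem.Str.replace (PySem.Str.replace resource_str "/" "_") "-" "_") "_").getD []).foldl
    (fun (parts : PySem.Set String) part =>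
      if (!(part == "")) && PySem.Str.strIsalpha part && decide (2 < PySem.Str.len part) then
        let p := PySem.Str.lower part
        let parts := PySem.Set.add parts p
        match DRUG_CLASS_ALIASES.get? p with
        | some a => PySem.Set.add parts a
        | none => parts
      else parts)
    PySem.Set.empty)

-- ===== PORT B =====
-- state of Source B's scan: (parts, run, ok); 'ch in "/-_"' on a single character is the
-- membership test written out; '"".join(run).lower()' is String.ofList (Chars.lower run)
def extract_drug_tokens_py_alt (resource_str : String) : List String :=
  ((resource_str.toList ++ ['_']).foldl
    (fun (st : PySem.Set String × List Char × Bool) ch =>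
      if ch == '/' || ch == '-' || ch == '_' then
        let parts :=
          if st.2.2 && decide (2 < st.2.1.length) then
            let p := String.ofList (PySem.Chars.lower st.2.1)
            let parts := PySem.Set.add st.1 p
            match DRUG_CLASS_ALIASES.get? p with
            | some a => PySem.Set.add parts a
            | none => parts
          else st.1
        (parts, [], true)
      else (st.1, st.2.1 ++ [ch], st.2.2 && PySem.Chars.isalpha ch))
    (PySem.Set.empty, [], true)).1

-- ===== PRECONDITION & SPEC =====
def Spec_extract_drug_tokens_py (resource_str : String) (out : List String) : Prop := out = extract_drug_tokens_py_alt resource_str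
instance (resource_str : String) (out : List String) : Decidable (Spec_extract_drug_tokens_py resource_str out) := by unfold Spec_extract_drug_tokens_py; infer_instance

-- ===== CLAIM (what is proved, stated in full; the proofs are below) =====
def Claim_equal_extract_drug_tokens_py : Prop := ∀ (resource_str : String), Dom_extract_drug_tokens_py resource_str → Spec_extract_drug_tokens_py resource_str (extract_drug_tokens_py resource_str)

-- ===== LEMMAS AND PROOFS =====

-- the separator characters, and the normalization A performs with its two replaces
def pvIsSep (c : Char) : Bool := c == '/' || c == '-' || c == '_'

-- split on separators, as (first piece, later pieces)
def pvSplit : List Char → List Char × List (List Char)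
  | [] => ([], [])
  | c :: t =>
    let r := pvSplit t
    if pvIsSep c then ([], r.1 :: r.2) else (c :: r.1, r.2)

-- flushing a run: add the lowered token and its alias if the run qualifies
def pvAddTok (acc : PySem.Set String) (p : List Char) : PySem.Set String :=
  let q := String.ofList (PySem.Chars.lower p)
  let acc := PySem.Set.add acc q
  match DRUG_CLASS_ALIASES.get? q with
  | some a => PySem.Set.add acc a
  | none => acc

def pvFlush (acc : PySem.Set String) (p : List Char) (ok : Bool) : PySem.Set String :=
  if ok && decide (2 < p.length) then pvAddTok acc p else acc

def pvPieceFlush (acc : PySem.Set String) (p : List Char) : PySem.Set String :=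
  pvFlush acc p (p.all PySem.Chars.isalpha)

-- replacing one character by '_' is a map
lemma replace_go_single (o : Char) :
    ∀ (fuel : Nat) (l acc : List Char), l.length ≤ fuel →
      PySem.Chars.replace.go [o] ['_'] fuel l acc
        = acc.reverse ++ l.map (fun c => if o == c then '_' else c) := by
  intro fuel
  induction fuel with
  | zero => intro l acc h; cases l with
    | nil => simp [PySem.Chars.replace.go]
    | cons c t => simp at h
  | succ n ih =>
    intro l acc h
    cases l with
    | nil => simp [PySem.Chars.replace.go]
    | cons c t =>
      simp only [PySem.Chars.replace.go]
      by_cases hc : o == c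
      · simp only [List.isPrefixOf, hc, Bool.true_and, if_true,
          List.length_cons, List.length_nil, List.drop_succ_cons, List.drop_zero]
        rw [ih t _ (by simpa using h)]
        simp
        intro hno
        exact absurd (by simpa using hc) hno
      · simp only [List.isPrefixOf, hc, Bool.false_and, Bool.false_eq_true, if_false]
        rw [ih t _ (by simpa using h)]
        simp
        intro e
        exact absurd e (by simpa using hc)

lemma replace_single (o : Char) (l : List Char) :
    PySem.Chars.replace l [o] ['_'] = l.map (fun c => if o == c then '_' else c) := by
  unfold PySem.Chars.replace
  rw [if_neg (by simp)]
  simpa using replace_go_single o l.length l []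

-- A's two replaces normalize every separator to '_'
lemma double_replace (l : List Char) :
    (l.map (fun c => if '/' == c then '_' else c)).map (fun c => if '-' == c then '_' else c)
      = l.map (fun c => if pvIsSep c then '_' else c) := by
  rw [List.map_map]
  apply List.map_congr_left
  intro c _
  simp only [Function.comp, pvIsSep]
  by_cases h1 : c = '/'
  · simp [h1]
  · by_cases h2 : c = '-'
    · simp [h2]
    · by_cases h3 : c = '_'
      · subst h3; simp
      · have n1 : ¬('/' = c) := fun e => h1 e.symm
        have n2 : ¬('-' = c) := fun e => h2 e.symm
        simp [h1, h2, h3, n1, n2]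

-- splitting the normalized list on '_' = pvSplit of the original list
lemma splitOn_go_norm :
    ∀ (fuel : Nat) (l : List Char) (cur : List Char) (acc : List (List Char)),
      l.length < fuel →
      PySem.Chars.splitOn.go ['_'] fuel (l.map (fun c => if pvIsSep c then '_' else c)) cur acc
        = acc.reverse ++ (cur.reverse ++ (pvSplit l).1) :: (pvSplit l).2 := by
  intro fuel
  induction fuel with
  | zero => intro l cur acc h; omega
  | succ n ih =>
    intro l cur acc h
    cases l with
    | nil => simp [PySem.Chars.splitOn.go, pvSplit]
    | cons c t =>
      simp only [List.map_cons, PySem.Chars.splitOn.go]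
      by_cases hc : pvIsSep c
      · simp only [hc, if_true, List.isPrefixOf, beq_self_eq_true, Bool.true_and,
          List.length_cons, List.length_nil, List.drop_succ_cons, List.drop_zero]
        rw [ih t [] _ (by simp at h; omega)]
        simp [pvSplit, hc]
      · have hc' : c ≠ '_' := by simp [pvIsSep] at hc; tauto
        have hne : ('_' == c) = false := by
          simp [beq_eq_false_iff_ne]; exact fun e => hc' e.symm
        simp only [hc, Bool.false_eq_true, if_false, List.isPrefixOf, hne,
          Bool.false_and]
        rw [ih t (c :: cur) acc (by simp at h; omega)]
        simp [pvSplit, hc]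

lemma split_pipeline (l : List Char) :
    PySem.Chars.splitOn (l.map (fun c => if pvIsSep c then '_' else c)) ['_']
      = (pvSplit l).1 :: (pvSplit l).2 := by
  unfold PySem.Chars.splitOn
  rw [splitOn_go_norm _ l [] [] (by simp)]
  simp

-- A's loop body on a piece (as a String) = pvPieceFlush on its characters
lemma bodyA_ofList (acc : PySem.Set String) (p : List Char) :
    (if (!(String.ofList p == "")) && PySem.Str.strIsalpha (String.ofList p)
        && decide (2 < PySem.Str.len (String.ofList p)) then
       let q := PySem.Str.lower (String.ofList p)
       let acc' := PySem.Set.add acc q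
       match DRUG_CLASS_ALIASES.get? q with
       | some a => PySem.Set.add acc' a
       | none => acc'
     else acc)
      = pvPieceFlush acc p := by
  have htl : (String.ofList p).toList = p := by simp
  have hlen : PySem.Str.len (String.ofList p) = (p.length : Int) := by
    rw [PySem.Str.len_eq, htl]
  have hlow : PySem.Str.lower (String.ofList p) = String.ofList (PySem.Chars.lower p) := by
    simp [PySem.Str.lower, htl]
  by_cases hL : 2 < p.length
  · have hne : p ≠ [] := by intro e; subst e; simp at hL
    have h0 : (String.ofList p == "") = false := by
      simp only [beq_eq_false_iff_ne]
      intro e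
      have := congrArg String.toList e
      simp [htl] at this
      exact hne this
    have halpha : PySem.Str.strIsalpha (String.ofList p) = p.all PySem.Chars.isalpha := by
      simp [PySem.Str.strIsalpha, htl, PySem.Chars.strIsalpha, List.isEmpty_eq_false_iff, hne]
    have hdec : (decide (2 < PySem.Str.len (String.ofList p))) = true := by
      rw [hlen]; exact_mod_cast decide_eq_true (by exact_mod_cast hL)
    rw [h0, halpha, hdec]
    simp only [Bool.not_false, Bool.true_and, Bool.and_true]
    unfold pvPieceFlush pvFlush
    rw [show (decide (2 < p.length)) = true from decide_eq_true hL]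
    simp only [Bool.and_true]
    by_cases hA : p.all PySem.Chars.isalpha
    · rw [hA, if_pos rfl, if_pos rfl]
      unfold pvAddTok
      rw [hlow]
    · rw [Bool.not_eq_true] at hA
      rw [hA, if_neg (by simp), if_neg (by simp)]
  · have hdec : (decide (2 < PySem.Str.len (String.ofList p))) = false := by
      rw [hlen]; simp; exact_mod_cast Nat.not_lt.mp hL
    rw [hdec]
    simp only [Bool.and_false, Bool.false_eq_true, if_false]
    unfold pvPieceFlush pvFlush
    rw [show (decide (2 < p.length)) = false from by simpa using hL]
    simp

-- fold of A's body over the pieces (as Strings) = fold of pvPieceFlush over the pieces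
lemma foldA_pieces (pieces : List (List Char)) (acc : PySem.Set String) :
    (pieces.map String.ofList).foldl
      (fun (parts : PySem.Set String) part =>
        if (!(part == "")) && PySem.Str.strIsalpha part && decide (2 < PySem.Str.len part) then
          let p := PySem.Str.lower part
          let parts := PySem.Set.add parts p
          match DRUG_CLASS_ALIASES.get? p with
          | some a => PySem.Set.add parts a
          | none => parts
        else parts) acc
      = pieces.foldl pvPieceFlush acc := by
  induction pieces generalizing acc with
  | nil => rfl
  | cons p rest ih => rw [List.map_cons, List.foldl_cons, List.foldl_cons, bodyA_ofList]; exact ih _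

-- B's character scan = fold of pvPieceFlush over the pvSplit pieces
lemma scan_split (l : List Char) :
    ∀ (acc : PySem.Set String) (run : List Char) (ok : Bool),
    ((l ++ ['_']).foldl
      (fun (st : PySem.Set String × List Char × Bool) ch =>
        if ch == '/' || ch == '-' || ch == '_' then
          let parts :=
            if st.2.2 && decide (2 < st.2.1.length) then
              let p := String.ofList (PySem.Chars.lower st.2.1)
              let parts := PySem.Set.add st.1 p
              match DRUG_CLASS_ALIASES.get? p with
              | some a => PySem.Set.add parts a
              | none => parts
            else st.1
          (parts, [], true)
        else (st.1, st.2.1 ++ [ch], st.2.2 && PySem.Chars.isalpha ch))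
      (acc, run, ok)).1
      = (pvSplit l).2.foldl pvPieceFlush
          (pvFlush acc (run ++ (pvSplit l).1) (ok && ((pvSplit l).1).all PySem.Chars.isalpha)) := by
  induction l with
  | nil =>
    intro acc run ok
    simp [pvSplit, pvFlush, pvAddTok]
  | cons c t ih =>
    intro acc run ok
    by_cases hc : pvIsSep c
    · have hb : (c == '/' || c == '-' || c == '_') = true := hc
      rw [List.cons_append, List.foldl_cons]
      simp only [hb, if_pos]
      rw [ih]
      simp [pvSplit, hc, pvPieceFlush, pvFlush, pvAddTok]
    · have hb : (c == '/' || c == '-' || c == '_') = false := by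
        simpa [pvIsSep] using hc
      rw [List.cons_append, List.foldl_cons]
      simp only [hb, Bool.false_eq_true, if_false]
      rw [ih]
      simp [pvSplit, hc, Bool.and_assoc, List.append_assoc]

-- ===== VERDICT (by name: the statement is the Claim_ definition above) =====
theorem extract_drug_tokens_py_spec : Claim_equal_extract_drug_tokens_py := by
  intro s _
  show extract_drug_tokens_py s = extract_drug_tokens_py_alt s
  unfold extract_drug_tokens_py extract_drug_tokens_py_alt
  have hx : (PySem.Str.replace (PySem.Str.replace s "/" "_") "-" "_").toList
      = s.toList.map (fun c => if pvIsSep c then '_' else c) := by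
    rw [PySem.Str.toList_replace, PySem.Str.toList_replace]
    show PySem.Chars.replace (PySem.Chars.replace s.toList ['/'] ['_']) ['-'] ['_'] = _
    rw [replace_single, replace_single, double_replace]
  have hsplit : PySem.Str.split? (PySem.Str.replace (PySem.Str.replace s "/" "_") "-" "_") "_"
      = some (((pvSplit s.toList).1 :: (pvSplit s.toList).2).map String.ofList) := by
    simp only [PySem.Str.split?, hx]
    show Option.map _ (PySem.Chars.split? _ ['_']) = _
    rw [PySem.Chars.split?, if_neg (by simp), split_pipeline]
    rfl
  rw [hsplit]
  simp only [Option.getD_some]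
  rw [foldA_pieces, scan_split]
  simp [List.foldl_cons, pvPieceFlush, pvFlush]
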